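-- pv_equiv track=rewrite | github.com/ImCuriosity/pet_analysis_models | image_sequence_model.py | choose_best_head_for_dog
-- ===== SOURCE A (Python) =====
-- def choose_best_head_for_dog(dog_box, heads):
--     x1,y1,x2,y2,_ = dog_box
--     best=None; best_area=-1
--     for (hx1,hy1,hx2,hy2,hs) in heads:
--         ix1=max(x1,hx1); iy1=max(y1,hy1)
--         ix2=min(x2,hx2); iy2=min(y2,hy2)
--         iw=max(0,ix2-ix1); ih=max(0,iy2-iy1)
--         inter=iw*ih
--         if inter<=0: continue
--         harea=(hx2-hx1)*(hy2-hy1)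
--         if harea>best_area:
--             best=(hx1,hy1,hx2,hy2,hs); best_area=harea
--     return best
-- ===== SOURCE B (Python) =====
-- def choose_best_head_for_dog(dog_box, heads):
--     x1, y1, x2, y2, _ = dog_box
--     # Sort by descending head area (stable, so ties keep original order),
--     # then the first head that overlaps the dog box is the answer.
--     for (hx1, hy1, hx2, hy2, hs) in sorted(heads, key=lambda h: -(h[2]-h[0])*(h[3]-h[1])):
--         if max(x1, hx1) < min(x2, hx2) and max(y1, hy1) < min(y2, hy2):
--             return (hx1, hy1, hx2, hy2, hs)
--     return None
-- ===== Notes on version B (the rewrite author's own statement) =====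
-- stated objective: alternative
-- what changed: Replaces A's single pass tracking (best, best_area) with sort-then-scan: stably sort heads by descending area and return the first one overlapping the dog box; stability reproduces A's strict-> earliest-tie rule.
import Mathlib
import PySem

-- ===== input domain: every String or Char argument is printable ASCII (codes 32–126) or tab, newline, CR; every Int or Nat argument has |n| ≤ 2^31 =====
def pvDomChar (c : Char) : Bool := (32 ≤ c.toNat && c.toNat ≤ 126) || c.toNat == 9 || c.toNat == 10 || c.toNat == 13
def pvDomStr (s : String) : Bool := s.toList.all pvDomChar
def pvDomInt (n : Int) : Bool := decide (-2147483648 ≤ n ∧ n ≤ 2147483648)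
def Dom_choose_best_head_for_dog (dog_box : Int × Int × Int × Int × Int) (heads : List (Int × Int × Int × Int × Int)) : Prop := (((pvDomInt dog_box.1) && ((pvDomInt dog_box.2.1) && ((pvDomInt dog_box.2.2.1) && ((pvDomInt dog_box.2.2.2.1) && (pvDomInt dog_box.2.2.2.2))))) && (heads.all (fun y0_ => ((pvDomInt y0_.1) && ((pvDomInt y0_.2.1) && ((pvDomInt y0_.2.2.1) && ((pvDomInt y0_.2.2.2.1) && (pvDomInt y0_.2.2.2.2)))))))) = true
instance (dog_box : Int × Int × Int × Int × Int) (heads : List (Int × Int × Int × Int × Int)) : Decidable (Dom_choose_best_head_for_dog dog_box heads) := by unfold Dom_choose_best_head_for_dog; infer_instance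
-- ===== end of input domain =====

-- B replaces A's stateful best/best_area pass by a sort-then-scan: stably sort heads by
-- descending area and return the first overlapping one (alternative algorithm, same result).


-- ===== PORT A =====
-- the loop body of A, over state (best, best_area)
def pvStepA (x1 y1 x2 y2 : Int)
    (st : Option (Int × Int × Int × Int × Int) × Int)
    (h : Int × Int × Int × Int × Int) :
    Option (Int × Int × Int × Int × Int) × Int :=
  match h, st with
  | (hx1, hy1, hx2, hy2, hs), (best, best_area) =>
    let ix1 := max x1 hx1
    let iy1 := max y1 hy1
    let ix2 := min x2 hx2
    let iy2 := min y2 hy2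
    let iw := max 0 (ix2 - ix1)
    let ih := max 0 (iy2 - iy1)
    let inter := iw * ih
    if inter ≤ 0 then (best, best_area)
    else
      let harea := (hx2 - hx1) * (hy2 - hy1)
      if harea > best_area then (some (hx1, hy1, hx2, hy2, hs), harea)
      else (best, best_area)

def choose_best_head_for_dog (dog_box : Int × Int × Int × Int × Int) (heads : List (Int × Int × Int × Int × Int)) : Option (Int × Int × Int × Int × Int) :=
  match dog_box with
  | (x1, y1, x2, y2, _) => (heads.foldl (pvStepA x1 y1 x2 y2) (none, -1)).1

-- ===== PORT B =====
-- Source B's sort key: minus head area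
def pvNegAreaKey (h : Int × Int × Int × Int × Int) : Int :=
  -((h.2.2.1 - h.1) * (h.2.2.2.1 - h.2.1))

-- Source B's overlap test: max(x1,hx1) < min(x2,hx2) and max(y1,hy1) < min(y2,hy2)
def pvOverlapB (x1 y1 x2 y2 : Int) (h : Int × Int × Int × Int × Int) : Bool :=
  decide (max x1 h.1 < min x2 h.2.2.1) && decide (max y1 h.2.1 < min y2 h.2.2.2.1)

def choose_best_head_for_dog_alt (dog_box : Int × Int × Int × Int × Int) (heads : List (Int × Int × Int × Int × Int)) : Option (Int × Int × Int × Int × Int) :=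
  match dog_box with
  | (x1, y1, x2, y2, _) =>
    (PySem.List.sorted heads pvNegAreaKey).find? (pvOverlapB x1 y1 x2 y2)

-- ===== PRECONDITION & SPEC =====
def Spec_choose_best_head_for_dog (dog_box : Int × Int × Int × Int × Int) (heads : List (Int × Int × Int × Int × Int)) (out : Option (Int × Int × Int × Int × Int)) : Prop := out = choose_best_head_for_dog_alt dog_box heads
instance (dog_box : Int × Int × Int × Int × Int) (heads : List (Int × Int × Int × Int × Int)) (out : Option (Int × Int × Int × Int × Int)) : Decidable (Spec_choose_best_head_for_dog dog_box heads out) := by unfold Spec_choose_best_head_for_dog; infer_instance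

-- ===== CLAIM (what is proved, stated in full; the proofs are below) =====
def Claim_equal_choose_best_head_for_dog : Prop := ∀ (dog_box : Int × Int × Int × Int × Int) (heads : List (Int × Int × Int × Int × Int)), Dom_choose_best_head_for_dog dog_box heads → Spec_choose_best_head_for_dog dog_box heads (choose_best_head_for_dog dog_box heads)

-- ===== LEMMAS AND PROOFS =====

-- head area, and A's positive-intersection test, as proof-side abbreviations
def pvHeadArea (h : Int × Int × Int × Int × Int) : Int :=
  (h.2.2.1 - h.1) * (h.2.2.2.1 - h.2.1)

def pvOverlapsA (x1 y1 x2 y2 : Int) (h : Int × Int × Int × Int × Int) : Bool :=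
  decide (0 < max 0 (min x2 h.2.2.1 - max x1 h.1) * max 0 (min y2 h.2.2.2.1 - max y1 h.2.1))

-- the "first maximum" selection step (max with strict improvement)
def pvMStep (acc : Option (Int × Int × Int × Int × Int)) (x : Int × Int × Int × Int × Int) :
    Option (Int × Int × Int × Int × Int) :=
  match acc with
  | none => some x
  | some m => if pvHeadArea m < pvHeadArea x then some x else some m

-- A's test and B's test agree
lemma overlapsA_eq_overlapB (x1 y1 x2 y2 : Int) (h : Int × Int × Int × Int × Int) :
    pvOverlapsA x1 y1 x2 y2 h = pvOverlapB x1 y1 x2 y2 h := by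
  obtain ⟨hx1, hy1, hx2, hy2, hs⟩ := h
  simp only [pvOverlapsA, pvOverlapB]
  rw [Bool.eq_iff_iff]
  simp only [Bool.and_eq_true, decide_eq_true_eq]
  constructor
  · intro hpos
    rcases mul_pos_iff.mp hpos with ⟨h1, h2⟩ | ⟨h1, _⟩
    · constructor <;> omega
    · omega
  · rintro ⟨h1, h2⟩
    exact mul_pos (by omega) (by omega)

-- an overlapping head has positive area
lemma overlap_pos_area (x1 y1 x2 y2 : Int) (h : Int × Int × Int × Int × Int)
    (hov : pvOverlapsA x1 y1 x2 y2 h = true) : 0 < pvHeadArea h := by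
  obtain ⟨hx1, hy1, hx2, hy2, hs⟩ := h
  simp only [pvOverlapsA, decide_eq_true_eq] at hov
  simp only [pvHeadArea]
  rcases mul_pos_iff.mp hov with ⟨h1, h2⟩ | ⟨h1, _⟩
  · exact mul_pos (by omega) (by omega)
  · omega

-- A's loop computes the first maximum-area overlapping head
lemma loop_eq (x1 y1 x2 y2 : Int) :
    ∀ (l : List (Int × Int × Int × Int × Int))
      (acc : Option (Int × Int × Int × Int × Int) × Int),
      (acc = (none, -1) ∨ ∃ b, acc = (some b, pvHeadArea b)) →
      (l.foldl (pvStepA x1 y1 x2 y2) acc).1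
        = (l.filter (pvOverlapsA x1 y1 x2 y2)).foldl pvMStep acc.1 := by
  intro l
  induction l with
  | nil => intro acc _; rfl
  | cons h t ih =>
    intro acc hinv
    obtain ⟨hx1, hy1, hx2, hy2, hs⟩ := h
    obtain ⟨best, ba⟩ := acc
    simp only [List.foldl_cons, List.filter_cons]
    by_cases hov : pvOverlapsA x1 y1 x2 y2 (hx1, hy1, hx2, hy2, hs) = true
    · have hpos : 0 < pvHeadArea (hx1, hy1, hx2, hy2, hs) :=
        overlap_pos_area x1 y1 x2 y2 _ hov
      have harea_eq : pvHeadArea (hx1, hy1, hx2, hy2, hs) = (hx2 - hx1) * (hy2 - hy1) := rfl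
      have hc : ¬ max 0 (min x2 hx2 - max x1 hx1) * max 0 (min y2 hy2 - max y1 hy1) ≤ 0 := by
        simp only [pvOverlapsA, decide_eq_true_eq] at hov
        exact not_le.mpr hov
      simp only [hov, if_true, List.foldl_cons]
      rcases hinv with h0 | ⟨b, hb⟩
      · obtain ⟨rfl, rfl⟩ := Prod.mk.injEq .. ▸ h0
        have hstep : pvStepA x1 y1 x2 y2 (none, -1) (hx1, hy1, hx2, hy2, hs)
            = (some (hx1, hy1, hx2, hy2, hs), (hx2 - hx1) * (hy2 - hy1)) := by
          simp [pvStepA, hc]; omega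
        rw [hstep]
        have : pvMStep none (hx1, hy1, hx2, hy2, hs) = some (hx1, hy1, hx2, hy2, hs) := rfl
        rw [this]
        exact harea_eq ▸ ih (some (hx1, hy1, hx2, hy2, hs), pvHeadArea (hx1, hy1, hx2, hy2, hs))
          (Or.inr ⟨_, rfl⟩)
      · obtain ⟨rfl, rfl⟩ := Prod.mk.injEq .. ▸ hb
        by_cases hgt : pvHeadArea b < pvHeadArea (hx1, hy1, hx2, hy2, hs)
        · have hstep : pvStepA x1 y1 x2 y2 (some b, pvHeadArea b) (hx1, hy1, hx2, hy2, hs)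
              = (some (hx1, hy1, hx2, hy2, hs), (hx2 - hx1) * (hy2 - hy1)) := by
            rw [harea_eq] at hgt
            simp [pvStepA, hc, hgt]
          rw [hstep]
          have : pvMStep (some b) (hx1, hy1, hx2, hy2, hs) = some (hx1, hy1, hx2, hy2, hs) := by
            simp [pvMStep, hgt]
          rw [this]
          exact harea_eq ▸ ih (some (hx1, hy1, hx2, hy2, hs), pvHeadArea (hx1, hy1, hx2, hy2, hs))
            (Or.inr ⟨_, rfl⟩)
        · have hstep : pvStepA x1 y1 x2 y2 (some b, pvHeadArea b) (hx1, hy1, hx2, hy2, hs)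
              = (some b, pvHeadArea b) := by
            rw [harea_eq] at hgt
            simp [pvStepA, hc, hgt]
          rw [hstep]
          have : pvMStep (some b) (hx1, hy1, hx2, hy2, hs) = some b := by
            simp [pvMStep, hgt]
          rw [this]
          exact ih (some b, pvHeadArea b) (Or.inr ⟨_, rfl⟩)
    · have hc : max 0 (min x2 hx2 - max x1 hx1) * max 0 (min y2 hy2 - max y1 hy1) ≤ 0 := by
        simp only [pvOverlapsA, decide_eq_true_eq] at hov
        omega
      simp only [hov]
      have hstep : pvStepA x1 y1 x2 y2 (best, ba) (hx1, hy1, hx2, hy2, hs) = (best, ba) := by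
        simp [pvStepA, hc]
      rw [hstep]
      exact ih (best, ba) hinv

-- find? skips an inserted element that fails the predicate
lemma find?_insertBy_neg {α : Type} (bef : α → α → Bool) (p : α → Bool) (x : α)
    (hx : p x = false) :
    ∀ (ys : List α), (PySem.List.insertBy bef x ys).find? p = ys.find? p := by
  intro ys
  induction ys with
  | nil => simp [PySem.List.insertBy, List.find?, hx]
  | cons y t ih =>
    by_cases hb : bef x y = true
    · simp [PySem.List.insertBy, hb, List.find?, hx]
    · simp only [PySem.List.insertBy, hb, if_false, Bool.false_eq_true]
      cases hpy : p y <;> simp [List.find?, hpy, ih]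

-- on a key-sorted list, inserting a passing element x: the first passing element of the
-- result is x exactly when every previously-found element has strictly larger key
lemma find?_insertBy_pos (p : (Int × Int × Int × Int × Int) → Bool)
    (x : Int × Int × Int × Int × Int) (hx : p x = true) :
    ∀ (ys : List (Int × Int × Int × Int × Int)),
      ys.Pairwise (fun a b => pvNegAreaKey a ≤ pvNegAreaKey b) →
      (PySem.List.insertBy (fun a b => decide (pvNegAreaKey a < pvNegAreaKey b)) x ys).find? p
        = match ys.find? p with
          | none => some x
          | some b => if pvNegAreaKey x < pvNegAreaKey b then some x else some b := by
  intro ys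
  induction ys with
  | nil => simp [PySem.List.insertBy, List.find?, hx]
  | cons y t ih =>
    intro hpw
    have hpwt : t.Pairwise (fun a b => pvNegAreaKey a ≤ pvNegAreaKey b) := hpw.of_cons
    have hyle : ∀ z ∈ t, pvNegAreaKey y ≤ pvNegAreaKey z := by
      intro z hz; exact (List.pairwise_cons.mp hpw).1 z hz
    by_cases hb : pvNegAreaKey x < pvNegAreaKey y
    · have hb' : (decide (pvNegAreaKey x < pvNegAreaKey y)) = true := by simp [hb]
      have hL : (PySem.List.insertBy (fun a b => decide (pvNegAreaKey a < pvNegAreaKey b)) x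
          (y :: t)).find? p = some x := by
        simp [PySem.List.insertBy, hb', hx]
      rw [hL]
      cases hf : (y :: t).find? p with
      | none => rfl
      | some b =>
        have hbmem : b ∈ y :: t := List.mem_of_find?_eq_some hf
        have : pvNegAreaKey y ≤ pvNegAreaKey b := by
          rcases List.mem_cons.mp hbmem with rfl | hbt
          · exact le_rfl
          · exact hyle b hbt
        have hxb : pvNegAreaKey x < pvNegAreaKey b := lt_of_lt_of_le hb this
        simp [hxb]
    · have hb' : (decide (pvNegAreaKey x < pvNegAreaKey y)) = false := by simp [hb]
      simp only [PySem.List.insertBy, hb', Bool.false_eq_true, if_false]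
      cases hpy : p y with
      | true =>
        rw [List.find?_cons_of_pos (h := hpy), List.find?_cons_of_pos (h := hpy)]
        simp [hb]
      | false =>
        rw [List.find?_cons_of_neg (h := by simp [hpy]), List.find?_cons_of_neg (h := by simp [hpy])]
        exact ih hpwt

-- the insertion-sort foldl (what PySem.List.sorted is by sorted_eq_foldl_insertBy)
def pvS (xs : List (Int × Int × Int × Int × Int)) : List (Int × Int × Int × Int × Int) :=
  xs.foldl (fun acc x =>
    PySem.List.insertBy (fun a b => decide (pvNegAreaKey a < pvNegAreaKey b)) x acc) []

lemma pvS_eq_sorted (xs : List (Int × Int × Int × Int × Int)) :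
    pvS xs = PySem.List.sorted xs pvNegAreaKey := by
  rw [PySem.List.sorted_eq_foldl_insertBy]; rfl

lemma pvS_pairwise (xs : List (Int × Int × Int × Int × Int)) :
    (pvS xs).Pairwise (fun a b => pvNegAreaKey a ≤ pvNegAreaKey b) := by
  rw [pvS_eq_sorted]; exact PySem.List.sorted_pairwise xs pvNegAreaKey

-- scanning the descending-area sort for the first passing head = first-max of the filter
lemma find?_pvS_eq (p : (Int × Int × Int × Int × Int) → Bool) :
    ∀ (xs : List (Int × Int × Int × Int × Int)),
      (pvS xs).find? p = (xs.filter p).foldl pvMStep none := by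
  intro xs
  induction xs using List.reverseRecOn with
  | nil => rfl
  | append_singleton t x ih =>
    have hS : pvS (t ++ [x])
        = PySem.List.insertBy (fun a b => decide (pvNegAreaKey a < pvNegAreaKey b)) x (pvS t) := by
      simp [pvS, List.foldl_append]
    rw [hS]
    cases hpx : p x with
    | false =>
      rw [find?_insertBy_neg _ p x hpx, ih]
      simp [List.filter_append, hpx]
    | true =>
      rw [find?_insertBy_pos p x hpx (pvS t) (pvS_pairwise t)]
      have hfilter : (t ++ [x]).filter p = t.filter p ++ [x] := by
        simp [List.filter_append, hpx]
      rw [hfilter, List.foldl_append, ← ih]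
      cases hf : (pvS t).find? p with
      | none => rfl
      | some b =>
        simp only [List.foldl_cons, List.foldl_nil, pvMStep]
        have hkey : pvNegAreaKey x < pvNegAreaKey b ↔ pvHeadArea b < pvHeadArea x := by
          simp [pvNegAreaKey, pvHeadArea]
        by_cases hlt : pvHeadArea b < pvHeadArea x
        · simp [hkey.mpr hlt, hlt]
        · have : ¬ pvNegAreaKey x < pvNegAreaKey b := fun h => hlt (hkey.mp h)
          simp [this, hlt]

-- ===== VERDICT (by name: the statement is the Claim_ definition above) =====
theorem choose_best_head_for_dog_spec : Claim_equal_choose_best_head_for_dog := by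
  intro db heads _
  obtain ⟨x1, y1, x2, y2, s⟩ := db
  show choose_best_head_for_dog _ _ = choose_best_head_for_dog_alt _ _
  simp only [choose_best_head_for_dog, choose_best_head_for_dog_alt]
  rw [← pvS_eq_sorted, find?_pvS_eq,
    show heads.filter (pvOverlapB x1 y1 x2 y2) = heads.filter (pvOverlapsA x1 y1 x2 y2) from
      List.filter_congr (fun h _ => (overlapsA_eq_overlapB x1 y1 x2 y2 h).symm)]
  exact loop_eq x1 y1 x2 y2 heads (none, -1) (Or.inl rfl)
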